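-- pv_equiv track=rewrite | github.com/aska912/kaoqin | AttendWorkbook.py | employ_id_competion
-- ===== SOURCE A (Python) =====
-- def employ_id_competion(raw_id):
--         id_len = 6
--         raw_id = str(raw_id)
--         raw_id_len = len(raw_id)
--         if raw_id_len < id_len:
--             while( len(raw_id) < id_len ):
--                 raw_id = "0%s"%raw_id
--         return raw_id
-- ===== SOURCE B (Python) =====
-- def employ_id_competion(raw_id):
--     s = str(raw_id)
--     return "0" * (6 - len(s)) + s
-- ===== Notes on version B (the rewrite author's own statement) =====
-- stated objective: idiomatic
-- what changed: Replaces the incremental while-loop that prepends one zero per iteration with a closed-form single expression: compute the pad deficit from the id's string length and prepend all zeros at once via string multiplication.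
import Mathlib
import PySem

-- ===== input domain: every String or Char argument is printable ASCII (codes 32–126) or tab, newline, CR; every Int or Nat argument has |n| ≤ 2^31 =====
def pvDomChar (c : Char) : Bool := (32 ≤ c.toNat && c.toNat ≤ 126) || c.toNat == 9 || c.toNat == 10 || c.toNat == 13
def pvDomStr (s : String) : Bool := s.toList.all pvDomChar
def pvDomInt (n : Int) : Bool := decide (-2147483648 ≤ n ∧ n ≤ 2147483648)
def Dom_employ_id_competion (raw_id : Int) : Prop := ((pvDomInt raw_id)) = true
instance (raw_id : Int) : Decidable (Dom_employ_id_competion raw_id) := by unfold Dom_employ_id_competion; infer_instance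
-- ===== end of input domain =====

-- B replaces A's one-zero-at-a-time while-loop by a closed-form pad: "0"*(6-len) prepended at once (idiomatic).

-- ===== PORT A =====
-- the `while len(raw_id) < 6: raw_id = "0%s" % raw_id` loop, decreasing on the deficit
def employ_id_competion_loop (s : List Char) : List Char :=
  if s.length < 6 then employ_id_competion_loop ('0' :: s) else s
termination_by 6 - s.length

def employ_id_competion (raw_id : Int) : String :=
  let s := PySem.Int.toChars raw_id
  let raw_id_len := s.length
  if raw_id_len < 6 then String.mk (employ_id_competion_loop s) else String.mk s

-- ===== PORT B =====
def employ_id_competion_alt (raw_id : Int) : String :=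
  let s := PySem.Int.toChars raw_id
  String.mk (List.replicate (6 - s.length) '0' ++ s)

-- ===== PRECONDITION & SPEC =====
def Spec_employ_id_competion (raw_id : Int) (out : String) : Prop := out = employ_id_competion_alt raw_id
instance (raw_id : Int) (out : String) : Decidable (Spec_employ_id_competion raw_id out) := by unfold Spec_employ_id_competion; infer_instance

-- ===== CLAIM (what is proved, stated in full; the proofs are below) =====
def Claim_equal_employ_id_competion : Prop := ∀ (raw_id : Int), Dom_employ_id_competion raw_id → Spec_employ_id_competion raw_id (employ_id_competion raw_id)

-- ===== LEMMAS AND PROOFS =====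
theorem employ_id_competion_loop_eq (s : List Char) :
    employ_id_competion_loop s = List.replicate (6 - s.length) '0' ++ s := by
  fun_induction employ_id_competion_loop s with
  | case1 s h ih =>
      rw [ih]
      have : 6 - s.length = (6 - (('0' :: s).length)) + 1 := by simp; omega
      rw [this, List.replicate_succ']
      simp
  | case2 s h =>
      have : 6 - s.length = 0 := by omega
      simp [this]

-- ===== VERDICT (by name: the statement is the Claim_ definition above) =====
theorem employ_id_competion_spec : Claim_equal_employ_id_competion := by
  intro raw_id _
  unfold Spec_employ_id_competion employ_id_competion employ_id_competion_alt
  simp only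
  split
  · rw [employ_id_competion_loop_eq]
  · rename_i h
    have : 6 - (PySem.Int.toChars raw_id).length = 0 := by omega
    rw [this]; simp
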